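-- pv_equiv track=rewrite | github.com/konkolorado/algorithms | bwtransform/BWT.py | make_letter_annotations
-- ===== SOURCE A (Python) =====
-- def make_letter_annotations(last_column):
--     """
--     For each row in last_column, determines which letter exists and
--     for repeated letters, determines which version of the letter it
--     is i.e. zero-eth, first occurence... This is used later to offset
--     the results of the list.index(letter) operation
--     """
--     annotations = {}
--     letter_counts = {}
--     for row in range(len(last_column)):
--         letter = last_column[row]
--
--         if letter in letter_counts:
--             letter_counts[letter] += 1
--         else:
--             letter_counts[letter] = 0
--         letter_index = letter_counts[letter]
--         annotations[row] = (last_column[row], letter_index)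
--
--     return annotations
-- ===== SOURCE B (Python) =====
-- def make_letter_annotations(last_column):
--     """
--     For each row, annotate with its letter and which occurrence of that
--     letter it is. Two passes: first group the row indices by letter (in
--     order of appearance), then scatter (letter, occurrence_index) back
--     into a positional table and emit it as a dict keyed by row.
--     """
--     positions = {}
--     for row, letter in enumerate(last_column):
--         positions.setdefault(letter, []).append(row)
--     annotations = [None] * len(last_column)
--     for letter, rows in positions.items():
--         for occ, row in enumerate(rows):
--             annotations[row] = (letter, occ)
--     return {row: pair for row, pair in enumerate(annotations)}
-- ===== Notes on version B (the rewrite author's own statement) =====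
-- stated objective: alternative
-- what changed: Replaces A's single pass that maintains a running per-letter counter dict and writes annotations row by row with a two-pass build-index-then-scatter scheme: first group the row indices by letter into a positions dict, then enumerate each letter's position list to scatter (letter, occurrence_index) into a positional table.
import Mathlib
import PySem

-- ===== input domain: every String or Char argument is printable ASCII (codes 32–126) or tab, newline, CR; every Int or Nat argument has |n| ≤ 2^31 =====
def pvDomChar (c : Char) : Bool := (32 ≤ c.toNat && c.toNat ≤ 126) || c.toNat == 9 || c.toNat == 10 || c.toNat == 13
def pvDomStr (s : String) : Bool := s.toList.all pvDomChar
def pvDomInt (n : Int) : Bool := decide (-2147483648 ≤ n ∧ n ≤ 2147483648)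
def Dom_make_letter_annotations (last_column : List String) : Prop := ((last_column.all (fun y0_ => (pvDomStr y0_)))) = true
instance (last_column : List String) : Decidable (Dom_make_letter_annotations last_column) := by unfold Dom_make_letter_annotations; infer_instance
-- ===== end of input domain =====

-- B replaces A's single pass with two mutable running dicts by a build-index-then-scatter
-- scheme: group the row indices by letter, then assign each row its occurrence index from
-- its letter's position list (alternative decomposition, same O(n) cost).


-- ===== PORT A =====
-- one iteration of A's loop body (row index is always in range, so pyGetD's default is never used)
def pvStepA (last_column : List String)
    (st : PySem.Dict Int (String × Int) × PySem.Dict String Int) (row : Int) :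
    PySem.Dict Int (String × Int) × PySem.Dict String Int :=
  let letter := PySem.List.pyGetD last_column row ""
  let letter_counts :=
    if st.2.contains letter then st.2.modify letter 0 (· + 1)
    else st.2.insert letter 0
  let letter_index := letter_counts.getD letter 0
  (st.1.insert row (PySem.List.pyGetD last_column row "", letter_index), letter_counts)

def make_letter_annotations (last_column : List String) : List (Int × String × Int) :=
  ((PySem.List.pyRange 0 (last_column.length) 1).foldl (pvStepA last_column)
    (PySem.Dict.empty, PySem.Dict.empty)).1.items

-- ===== PORT B =====
-- first pass of B: positions[letter] = list of rows where it occurs, in order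
def pvGroupsB (last_column : List String) : PySem.Dict String (List Int) :=
  (PySem.List.enumerate last_column 0).foldl
    (fun d p => d.modify p.2 [] (· ++ [p.1])) PySem.Dict.empty

-- inner loop of B's second pass: scatter one letter's annotations into the table
def pvInnerB (ann : List (Option (String × Int))) (q : String × List Int) :
    List (Option (String × Int)) :=
  (PySem.List.enumerate q.2 0).foldl
    (fun ann r => PySem.List.pySetD ann r.2 (some (q.1, r.1))) ann

def make_letter_annotations_alt (last_column : List String) : List (Int × String × Int) :=
  let annotations :=
    (pvGroupsB last_column).items.foldl pvInnerB
      (List.replicate last_column.length none)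
  -- every slot of `annotations` is written during the scatter pass (proved below),
  -- so the Option default standing in for Python's initial None is never read
  (PySem.List.enumerate annotations 0).map (fun p => (p.1, p.2.getD ("", 0)))

-- ===== PRECONDITION & SPEC =====
def Spec_make_letter_annotations (last_column : List String) (out : List (Int × String × Int)) : Prop := out = make_letter_annotations_alt last_column
instance (last_column : List String) (out : List (Int × String × Int)) : Decidable (Spec_make_letter_annotations last_column out) := by unfold Spec_make_letter_annotations; infer_instance

-- ===== CLAIM (what is proved, stated in full; the proofs are below) =====
def Claim_equal_make_letter_annotations : Prop := ∀ (last_column : List String), Dom_make_letter_annotations last_column → Spec_make_letter_annotations last_column (make_letter_annotations last_column)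

-- ===== LEMMAS AND PROOFS =====

-- the common canonical form both programs compute: row i carries its letter and the
-- number of earlier occurrences of that letter
def pvOcc (l : List String) (i : Int) (c : String) : Int :=
  (PySem.List.count (PySem.List.slice l none (some i)) c : Int)

def pvCanon (l : List String) : List (Int × String × Int) :=
  (PySem.List.enumerate l 0).map (fun p => (p.1, p.2, pvOcc l p.1 p.2))

def pvGroup (l : List String) (c : String) : List Int :=
  ((PySem.List.enumerate l 0).filter (fun p => p.2 == c)).map (·.1)

def pvFilled (l : List String) : List (Option (String × Int)) :=
  (PySem.List.enumerate l 0).map (fun p => some (p.2, pvOcc l p.1 p.2))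

lemma enumerate_append_singleton {α : Type} (l : List α) (x : α) (s : Int) :
    PySem.List.enumerate (l ++ [x]) s = PySem.List.enumerate l s ++ [(s + l.length, x)] := by
  induction l generalizing s with
  | nil => simp [PySem.List.enumerate_nil, PySem.List.enumerate_cons]
  | cons a t ih =>
      simp [PySem.List.enumerate_cons, ih]
      ring_nf

lemma pvGroup_bounds (l : List String) (c : String) {i : Int} (hi : i ∈ pvGroup l c) :
    0 ≤ i ∧ i < (l.length : Int) := by
  simp only [pvGroup, List.mem_map, List.mem_filter] at hi
  obtain ⟨p, ⟨hp, -⟩, rfl⟩ := hi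
  rcases (PySem.List.mem_enumerate_iff _ _ _).1 hp with ⟨k, hk, rfl⟩
  simp
  omega

lemma pvGroup_append (l : List String) (x : String) (c : String) :
    pvGroup (l ++ [x]) c = pvGroup l c ++ (if x = c then [(l.length : Int)] else []) := by
  unfold pvGroup
  rw [enumerate_append_singleton]
  by_cases hxc : x = c <;> simp [List.filter_append, hxc]

lemma pvGroup_nil_of_not_mem {l : List String} {x : String} (hx : x ∉ l) :
    pvGroup l x = [] := by
  unfold pvGroup
  rw [List.filter_eq_nil_iff.2, List.map_nil]
  intro p hp
  rcases (PySem.List.mem_enumerate_iff _ _ _).1 hp with ⟨k, hk, rfl⟩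
  have : l[k] ≠ x := fun h => hx (h ▸ List.getElem_mem hk)
  simpa using this

lemma pvGroup_length (l : List String) (c : String) :
    (pvGroup l c).length = l.count c := by
  unfold pvGroup
  rw [List.length_map, ← List.countP_eq_length_filter]
  have h2 : List.countP (fun p => p.2 == c) (PySem.List.enumerate l 0)
      = List.countP (fun y => y == c) ((PySem.List.enumerate l 0).map (·.2)) := by
    rw [List.countP_map]
    rfl
  rw [h2, PySem.List.map_snd_enumerate]
  rfl

-- scatter of one group: length preservation and behaviour on an extended table
lemma inner_go_length (c : String) (rows : List Int) (s : Int)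
    (a : List (Option (String × Int))) :
    ((PySem.List.enumerate rows s).foldl
      (fun ann r => PySem.List.pySetD ann r.2 (some (c, r.1))) a).length = a.length := by
  induction rows generalizing s a with
  | nil => simp [PySem.List.enumerate_nil]
  | cons i t ih =>
      simp only [PySem.List.enumerate_cons, List.foldl_cons]
      rw [ih]
      exact PySem.List.length_pySetD _ _ _

lemma inner_go_lift (c : String) (rows : List Int) (s : Int)
    (a : List (Option (String × Int))) (v : Option (String × Int))
    (hb : ∀ i ∈ rows, 0 ≤ i ∧ i < (a.length : Int)) :
    (PySem.List.enumerate rows s).foldl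
        (fun ann r => PySem.List.pySetD ann r.2 (some (c, r.1))) (a ++ [v])
      = (PySem.List.enumerate rows s).foldl
          (fun ann r => PySem.List.pySetD ann r.2 (some (c, r.1))) a ++ [v] := by
  induction rows generalizing s a with
  | nil => simp [PySem.List.enumerate_nil]
  | cons i t ih =>
      obtain ⟨h0, h1⟩ := hb i (by simp)
      simp only [PySem.List.enumerate_cons, List.foldl_cons]
      have hset : PySem.List.pySetD (a ++ [v]) i (some (c, s))
          = PySem.List.pySetD a i (some (c, s)) ++ [v] := by
        rw [PySem.List.pySetD_of_nonneg _ _ h0, PySem.List.pySetD_of_nonneg _ _ h0,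
          List.set_append, if_pos (by omega)]
      rw [hset, ih]
      intro j hj
      have := hb j (by simp [hj])
      simpa [PySem.List.length_pySetD] using this

lemma pvInnerB_length (a : List (Option (String × Int))) (q : String × List Int) :
    (pvInnerB a q).length = a.length := inner_go_length q.1 q.2 0 a

lemma pvInnerB_lift (a : List (Option (String × Int))) (v : Option (String × Int))
    (q : String × List Int) (hb : ∀ i ∈ q.2, 0 ≤ i ∧ i < (a.length : Int)) :
    pvInnerB (a ++ [v]) q = pvInnerB a q ++ [v] :=
  inner_go_lift q.1 q.2 0 a v hb

-- scattering a group whose last row is the (fresh) final slot writes that slot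
lemma pvInnerB_last (a : List (Option (String × Int))) (v : Option (String × Int))
    (c : String) (rows : List Int)
    (hb : ∀ i ∈ rows, 0 ≤ i ∧ i < (a.length : Int)) :
    pvInnerB (a ++ [v]) (c, rows ++ [(a.length : Int)])
      = pvInnerB a (c, rows) ++ [some (c, (rows.length : Int))] := by
  unfold pvInnerB
  simp only
  rw [enumerate_append_singleton, List.foldl_append]
  have hlift := pvInnerB_lift a v (c, rows) hb
  unfold pvInnerB at hlift
  simp only at hlift
  rw [hlift]
  simp only [List.foldl_cons, List.foldl_nil, zero_add]
  have hlen : ((PySem.List.enumerate rows 0).foldl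
      (fun ann r => PySem.List.pySetD ann r.2 (some (c, r.1))) a).length = a.length :=
    inner_go_length c rows 0 a
  rw [PySem.List.pySetD_of_nonneg _ _ (by positivity), List.set_append,
    if_neg (by simp [hlen])]
  simp [hlen]

lemma scatter_length (gs : List (String × List Int)) (a : List (Option (String × Int))) :
    (gs.foldl pvInnerB a).length = a.length := by
  induction gs generalizing a with
  | nil => rfl
  | cons q t ih => rw [List.foldl_cons, ih, pvInnerB_length]

lemma scatter_lift (gs : List (String × List Int)) (a : List (Option (String × Int)))
    (v : Option (String × Int))
    (hb : ∀ q ∈ gs, ∀ i ∈ q.2, 0 ≤ i ∧ i < (a.length : Int)) :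
    gs.foldl pvInnerB (a ++ [v]) = gs.foldl pvInnerB a ++ [v] := by
  induction gs generalizing a with
  | nil => rfl
  | cons q t ih =>
      rw [List.foldl_cons, List.foldl_cons,
        pvInnerB_lift a v q (hb q (by simp)), ih]
      intro q' hq' i hi
      have := hb q' (by simp [hq']) i hi
      simpa [pvInnerB_length] using this

-- B's first pass, characterised: the groups are the letters in first-occurrence order,
-- each with its ordered list of row indices
lemma items_groups (l : List String) :
    (pvGroupsB l).items = (PySem.Set.ofList l).map (fun c => (c, pvGroup l c)) := by
  have hkeys : (pvGroupsB l).keys = PySem.Set.ofList l := by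
    unfold pvGroupsB
    rw [PySem.Dict.keys_foldl_modify_key (PySem.List.enumerate l 0) (·.2) []
      (fun _ p => (· ++ [p.1])) PySem.Dict.empty]
    rw [PySem.Dict.keys_empty, PySem.List.map_snd_enumerate, PySem.Set.update_nil_left]
  have hnodup : (pvGroupsB l).keys.Nodup := by
    rw [hkeys]; exact PySem.Set.nodup_ofList l
  have hget : ∀ c, (pvGroupsB l).getD c [] = pvGroup l c := by
    intro c
    unfold pvGroupsB
    rw [show ((PySem.List.enumerate l 0).foldl
        (fun d p => d.modify p.2 [] (· ++ [p.1])) PySem.Dict.empty)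
      = (((PySem.List.enumerate l 0).map Prod.swap).foldl
        (fun d p => d.modify p.1 [] (· ++ [p.2])) PySem.Dict.empty) from by
        rw [List.foldl_map]
        rfl]
    rw [PySem.Dict.getD_foldl_modify_append]
    rw [List.filter_map, List.map_map]
    simp [PySem.Dict.getD_empty, pvGroup]
    rfl
  rw [PySem.Dict.items_eq_map_keys _ hnodup [], hkeys]
  exact List.map_congr_left fun c _ => by rw [hget c]

-- the canonical annotation list grows by one entry when a letter is appended
lemma pvFilled_append (l : List String) (x : String) :
    pvFilled (l ++ [x]) = pvFilled l ++ [some (x, (l.count x : Int))] := by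
  unfold pvFilled
  rw [enumerate_append_singleton, List.map_append]
  congr 1
  · apply List.map_congr_left
    intro p hp
    rcases (PySem.List.mem_enumerate_iff _ _ _).1 hp with ⟨k, hk, rfl⟩
    simp only [zero_add, pvOcc]
    rw [PySem.List.slice_to_natCast, PySem.List.slice_to_natCast,
      List.take_append_of_le_length (le_of_lt hk)]
  · simp only [zero_add, List.map_cons, List.map_nil, pvOcc]
    rw [PySem.List.slice_to_natCast, List.take_append_of_le_length (le_refl _),
      List.take_length]
    simp [PySem.List.count_eq]

-- B's second pass fills every slot with the canonical annotation
lemma scatter_filled (l : List String) :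
    (pvGroupsB l).items.foldl pvInnerB (List.replicate l.length none) = pvFilled l := by
  induction l using List.reverseRecOn with
  | nil => simp [pvGroupsB, PySem.List.enumerate_nil, pvFilled, PySem.Dict.empty]
  | append_singleton l x ih =>
      rw [items_groups] at ih ⊢
      have hbound : ∀ c, ∀ i ∈ pvGroup l c,
          0 ≤ i ∧ i < ((List.replicate l.length (none : Option (String × Int))).length : Int) := by
        intro c i hi
        simpa using pvGroup_bounds l c hi
      have hrepl : List.replicate (l ++ [x]).length (none : Option (String × Int))
          = List.replicate l.length none ++ [none] := by
        simp [List.replicate_succ']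
      rw [hrepl, pvFilled_append]
      by_cases hx : x ∈ l
      · -- x already has a group: it gains one more row index at the end
        have hset : PySem.Set.ofList (l ++ [x]) = PySem.Set.ofList l := by
          rw [PySem.Set.ofList_append_singleton,
            PySem.Set.add_of_mem ((PySem.Set.mem_ofList l x).2 hx)]
        obtain ⟨S1, S2, hsplit⟩ := List.append_of_mem ((PySem.Set.mem_ofList l x).2 hx)
        have hnd := PySem.Set.nodup_ofList l
        rw [hsplit] at hnd
        have hx1 : x ∉ S1 := by
          intro h
          exact (List.disjoint_of_nodup_append hnd) h (by simp)
        have hx2 : x ∉ S2 := by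
          have := (List.nodup_append.1 hnd).2.1
          simpa using (List.nodup_cons.1 this).1
        have hmapS1 : S1.map (fun c => (c, pvGroup (l ++ [x]) c))
            = S1.map (fun c => (c, pvGroup l c)) :=
          List.map_congr_left fun c hc => by
            rw [pvGroup_append, if_neg (by rintro rfl; exact hx1 hc), List.append_nil]
        have hmapS2 : S2.map (fun c => (c, pvGroup (l ++ [x]) c))
            = S2.map (fun c => (c, pvGroup l c)) :=
          List.map_congr_left fun c hc => by
            rw [pvGroup_append, if_neg (by rintro rfl; exact hx2 hc), List.append_nil]
        have hgx : pvGroup (l ++ [x]) x = pvGroup l x ++ [(l.length : Int)] := by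
          rw [pvGroup_append, if_pos rfl]
        rw [hset, hsplit]
        simp only [List.map_append, List.map_cons, List.foldl_append, List.foldl_cons,
          hmapS1, hmapS2, hgx]
        rw [scatter_lift _ _ _ (by
          intro q hq i hi
          rcases List.mem_map.1 hq with ⟨c, hc, rfl⟩
          exact hbound c i hi)]
        have hlen1 : ((S1.map (fun c => (c, pvGroup l c))).foldl pvInnerB
            (List.replicate l.length none)).length = l.length := by
          rw [scatter_length]; simp
        rw [show ((l.length : Int)) = (((S1.map (fun c => (c, pvGroup l c))).foldl pvInnerB
            (List.replicate l.length none)).length : Int) by rw [hlen1]]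
        rw [pvInnerB_last _ _ _ _ (by
          intro i hi
          have := pvGroup_bounds l x hi
          simpa [hlen1] using this)]
        rw [scatter_lift _ _ _ (by
          intro q hq i hi
          rcases List.mem_map.1 hq with ⟨c, hc, rfl⟩
          have := pvGroup_bounds l c hi
          simpa [pvInnerB_length, hlen1] using this)]
        rw [← List.foldl_cons, ← List.foldl_append]
        rw [show (S1.map (fun c => (c, pvGroup l c)) ++ (x, pvGroup l x)
              :: S2.map (fun c => (c, pvGroup l c)))
            = (S1 ++ x :: S2).map (fun c => (c, pvGroup l c)) by simp]
        rw [← hsplit, ih, pvGroup_length]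
      · -- first occurrence of x: a fresh one-element group is appended
        have hset : PySem.Set.ofList (l ++ [x])
            = PySem.Set.ofList l ++ [x] := by
          rw [PySem.Set.ofList_append_singleton,
            PySem.Set.add_of_not_mem (fun h => hx ((PySem.Set.mem_ofList l x).1 h))]
        have hmap : (PySem.Set.ofList l).map (fun c => (c, pvGroup (l ++ [x]) c))
            = (PySem.Set.ofList l).map (fun c => (c, pvGroup l c)) :=
          List.map_congr_left fun c hc => by
            rw [pvGroup_append,
              if_neg (by rintro rfl; exact hx ((PySem.Set.mem_ofList l x).1 hc)), List.append_nil]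
        have hgx : pvGroup (l ++ [x]) x = [(l.length : Int)] := by
          rw [pvGroup_append, if_pos rfl, pvGroup_nil_of_not_mem hx, List.nil_append]
        rw [hset]
        simp only [List.map_append, List.map_cons, List.map_nil, List.foldl_append,
          List.foldl_cons, List.foldl_nil, hmap, hgx]
        rw [scatter_lift _ _ _ (by
          intro q hq i hi
          rcases List.mem_map.1 hq with ⟨c, hc, rfl⟩
          exact hbound c i hi)]
        have hlen1 : (((PySem.Set.ofList l).map (fun c => (c, pvGroup l c))).foldl pvInnerB
            (List.replicate l.length none)).length = l.length := by
          rw [scatter_length]; simp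
        rw [show ((l.length : Int)) = ((((PySem.Set.ofList l).map (fun c => (c, pvGroup l c))).foldl
            pvInnerB (List.replicate l.length none)).length : Int) by rw [hlen1]]
        rw [show ((((PySem.Set.ofList l).map (fun c => (c, pvGroup l c))).foldl
              pvInnerB (List.replicate l.length none)).length : Int)
            :: ([] : List Int) = [] ++ [((((PySem.Set.ofList l).map (fun c => (c, pvGroup l c))).foldl
              pvInnerB (List.replicate l.length none)).length : Int)] from rfl]
        rw [pvInnerB_last _ _ _ _ (by intro i hi; simp at hi)]
        rw [ih]
        simp [pvInnerB, PySem.List.enumerate_nil, List.count_eq_zero.2 hx]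

-- B computes the canonical form
lemma alt_eq_canon (l : List String) : make_letter_annotations_alt l = pvCanon l := by
  unfold make_letter_annotations_alt
  rw [scatter_filled]
  unfold pvFilled pvCanon
  apply List.ext_getElem
  · simp [PySem.List.length_enumerate]
  · intro k h1 h2
    simp [PySem.List.getElem_enumerate]

-- inserting row n into the annotations dict appends the new annotation
lemma pv_items_step (l : List String) (x : String)
    (h1 : (((PySem.List.pyRange 0 (l.length) 1).foldl (pvStepA l)
        (PySem.Dict.empty, PySem.Dict.empty)).1.items
      = pvCanon l)) :
    ((((PySem.List.pyRange 0 (l.length) 1).foldl (pvStepA l)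
        (PySem.Dict.empty, PySem.Dict.empty)).1).insert ((l.length : Int))
        (x, (l.count x : Int))).items
      = pvCanon (l ++ [x]) := by
  set st := (PySem.List.pyRange 0 (l.length) 1).foldl (pvStepA l)
    (PySem.Dict.empty, PySem.Dict.empty) with hst
  have hnotin : st.1.contains ((l.length : Int)) = false := by
    by_contra h
    rw [Bool.not_eq_false] at h
    have hmem := (PySem.Dict.contains_iff_mem_keys st.1 _).1 h
    have : ((l.length : Int)) ∈ st.1.items.map (·.1) := hmem
    rw [h1] at this
    simp only [pvCanon, List.map_map, List.mem_map] at this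
    obtain ⟨p, hp, hfst⟩ := this
    rcases (PySem.List.mem_enumerate_iff _ _ _).1 hp with ⟨k, hk, rfl⟩
    simp at hfst
    omega
  rw [PySem.Dict.items_insert_of_not_contains _ _ hnotin, h1]
  -- now compute B on l ++ [x]
  unfold pvCanon pvOcc
  rw [enumerate_append_singleton, List.map_append]
  congr 1
  · apply List.map_congr_left
    intro p hp
    rcases (PySem.List.mem_enumerate_iff _ _ _).1 hp with ⟨k, hk, rfl⟩
    simp only [zero_add]
    rw [PySem.List.slice_to_natCast, PySem.List.slice_to_natCast,
      List.take_append_of_le_length (le_of_lt hk)]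
  · simp only [zero_add, List.map_cons, List.map_nil]
    rw [PySem.List.slice_to_natCast, List.take_append_of_le_length (le_refl _),
      List.take_length]
    simp [PySem.List.count_eq]

-- invariant of A's loop after consuming the whole list l
lemma stateA_spec (l : List String) :
    (((PySem.List.pyRange 0 (l.length) 1).foldl (pvStepA l)
        (PySem.Dict.empty, PySem.Dict.empty)).1.items
      = pvCanon l)
    ∧ (∀ s, (((PySem.List.pyRange 0 (l.length) 1).foldl (pvStepA l)
        (PySem.Dict.empty, PySem.Dict.empty)).2.contains s) = decide (s ∈ l))
    ∧ (∀ s, (((PySem.List.pyRange 0 (l.length) 1).foldl (pvStepA l)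
        (PySem.Dict.empty, PySem.Dict.empty)).2.getD s 0)
        = (l.count s : Int) - (if s ∈ l then 1 else 0)) := by
  induction l using List.reverseRecOn with
  | nil =>
      refine ⟨?_, ?_, ?_⟩
      · simp [pvCanon, PySem.List.enumerate_nil, PySem.Dict.empty]
      · intro s; simp [PySem.Dict.contains_empty]
      · intro s; simp [PySem.Dict.getD_empty]
  | append_singleton l x ih =>
      obtain ⟨h1, h2, h3⟩ := ih
      -- the range splits off its last index, and the first n steps ignore x
      have hn : ((l ++ [x]).length : Int) = (l.length : Int) + 1 := by
        simp
      have hsplit : PySem.List.pyRange 0 ((l ++ [x]).length) 1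
          = PySem.List.pyRange 0 (l.length) 1 ++ [(l.length : Int)] := by
        rw [hn, PySem.List.pyRange_one_succ_right (by positivity)]
      have hcongr : (PySem.List.pyRange 0 (l.length) 1).foldl (pvStepA (l ++ [x]))
            (PySem.Dict.empty, PySem.Dict.empty)
          = (PySem.List.pyRange 0 (l.length) 1).foldl (pvStepA l)
            (PySem.Dict.empty, PySem.Dict.empty) := by
        apply PySem.List.foldl_congr_mem
        intro acc row hrow
        rcases (PySem.List.mem_pyRange_one).1 hrow with ⟨hr0, hrn⟩
        have hrl : row < ((l : List String).length : Int) := hrn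
        have hget : PySem.List.pyGetD (l ++ [x]) row ""
            = PySem.List.pyGetD l row "" := by
          rw [PySem.List.pyGetD_eq_getElem _ _ hr0 (by simp; omega),
              PySem.List.pyGetD_eq_getElem _ _ hr0 (by exact_mod_cast hrl)]
          exact List.getElem_append_left (by omega)
        simp [pvStepA, hget]
      set st := (PySem.List.pyRange 0 (l.length) 1).foldl (pvStepA l)
        (PySem.Dict.empty, PySem.Dict.empty) with hst
      have hfold : (PySem.List.pyRange 0 ((l ++ [x]).length) 1).foldl (pvStepA (l ++ [x]))
            (PySem.Dict.empty, PySem.Dict.empty)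
          = pvStepA (l ++ [x]) st ((l.length : Int)) := by
        rw [hsplit, List.foldl_append, hcongr]
        simp
      -- the letter read at row n is x
      have hletter : PySem.List.pyGetD (l ++ [x]) ((l.length : Int)) "" = x := by
        rw [PySem.List.pyGetD_eq_getElem _ _ (by positivity) (by rw [hn]; omega)]
        exact List.getElem_concat_length (Int.toNat_natCast _) (by simp)
      -- the updated counter dict and the occurrence index
      have hcnt : st.2.contains x = decide (x ∈ l) := h2 x
      -- unfold one step
      rw [hfold]
      simp only [pvStepA, hletter, hcnt]
      by_cases hx : x ∈ l
      · -- x seen before: modify branch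
        simp only [hx, decide_true, if_true]
        have hidx : (st.2.modify x 0 (· + 1)).getD x 0 = (l.count x : Int) := by
          rw [PySem.Dict.getD_modify]
          simp [h3 x, hx]
        refine ⟨?_, ?_, ?_⟩
        · rw [hidx]
          exact pv_items_step l x h1
        · intro s
          rw [PySem.Dict.contains_modify, h2 s]
          by_cases hsx : s = x <;> simp [hsx, hx]
        · intro s
          have hpos : 0 < l.count x := List.count_pos_iff.2 hx
          rw [PySem.Dict.getD_modify]
          by_cases hsx : s = x
          · subst hsx
            rw [if_pos rfl, h3 s]
            simp [List.count_append, hx]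
          · rw [if_neg hsx, h3 s]
            simp [List.count_append, Ne.symm hsx, hsx]
      · -- first occurrence: insert branch
        simp only [hx, decide_false, Bool.false_eq_true, if_false]
        have hc0 : l.count x = 0 := List.count_eq_zero.2 hx
        have hidx : (st.2.insert x 0).getD x 0 = (l.count x : Int) := by
          rw [PySem.Dict.getD_insert]
          simp [hc0]
        refine ⟨?_, ?_, ?_⟩
        · rw [hidx]
          exact pv_items_step l x h1
        · intro s
          rw [PySem.Dict.contains_insert, h2 s]
          by_cases hsx : s = x <;> simp [hsx, hx]
        · intro s
          rw [PySem.Dict.getD_insert]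
          by_cases hsx : s = x
          · subst hsx
            rw [if_pos rfl]
            simp [List.count_append, hc0, hx]
          · rw [if_neg hsx, h3 s]
            simp [List.count_append, Ne.symm hsx, hsx]


-- ===== VERDICT (by name: the statement is the Claim_ definition above) =====
theorem make_letter_annotations_spec : Claim_equal_make_letter_annotations := by
  intro l _
  show make_letter_annotations l = make_letter_annotations_alt l
  rw [alt_eq_canon]
  exact (stateA_spec l).1
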